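-- pv_equiv track=rewrite | github.com/Quillar/ExtensionsGolomb | BFlagrange.py | cubog1
-- ===== SOURCE A (Python) =====
-- def cubog1(n):
--     x1, x2, s = 1,1,0
--     while (x1<n):
--         x2=1
--         while (x2<n):
--             if ((x2+x1!=n) and (x1!=x2)):
--                 s+=1
--             x2+=1
--         x1+=1
--     return s
-- ===== SOURCE B (Python) =====
-- def cubog1(n):
--     # Closed-form count: pairs (x1,x2) in [1,n)^2 minus the n-1 pairs with
--     # x1+x2==n and the n-1 pairs with x1==x2, adding back the single overlap
--     # (x1==x2==n/2) when n is even: (n-1)^2 - 2(n-1) + [n even] = (n-1)(n-3) + [n even].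
--     if n <= 1:
--         return 0
--     return (n - 1) * (n - 3) + (1 if n % 2 == 0 else 0)
-- ===== Notes on version B (the rewrite author's own statement) =====
-- stated objective: faster
-- what changed: Replaced the O(n^2) double loop counting pairs (x1,x2) in [1,n)^2 with sum!=n and x1!=x2 by the O(1) inclusion-exclusion closed form (n-1)(n-3) + [n even] (0 for n<=1).
import Mathlib
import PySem

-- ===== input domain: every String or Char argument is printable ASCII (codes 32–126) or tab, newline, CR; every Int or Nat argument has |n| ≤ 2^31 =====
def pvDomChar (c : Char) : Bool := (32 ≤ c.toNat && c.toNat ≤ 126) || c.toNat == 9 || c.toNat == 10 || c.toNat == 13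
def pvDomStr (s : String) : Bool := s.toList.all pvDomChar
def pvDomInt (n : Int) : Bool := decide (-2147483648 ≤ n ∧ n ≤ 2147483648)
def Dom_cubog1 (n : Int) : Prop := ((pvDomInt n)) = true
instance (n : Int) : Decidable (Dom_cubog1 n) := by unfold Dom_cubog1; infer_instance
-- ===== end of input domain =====

-- B replaces A's O(n^2) double loop by the O(1) inclusion-exclusion closed form (objective: faster, asymptotic).

-- ===== PORT A =====
-- inner while loop: while x2 < n: if (x2+x1!=n) and (x1!=x2): s+=1; x2+=1
def cubog1Inner (n x1 x2 s : Int) : Int :=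
  if x2 < n then
    cubog1Inner n x1 (x2 + 1) (if x2 + x1 ≠ n ∧ x1 ≠ x2 then s + 1 else s)
  else s
termination_by (n - x2).toNat
decreasing_by omega

-- outer while loop: while x1 < n: (inner loop from x2=1); x1+=1
def cubog1Outer (n x1 s : Int) : Int :=
  if x1 < n then cubog1Outer n (x1 + 1) (cubog1Inner n x1 1 s) else s
termination_by (n - x1).toNat
decreasing_by omega

def cubog1 (n : Int) : Int := cubog1Outer n 1 0

-- ===== PORT B =====
def cubog1_alt (n : Int) : Int :=
  if n ≤ 1 then 0 else (n - 1) * (n - 3) + (if n % 2 = 0 then 1 else 0)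

-- ===== PRECONDITION & SPEC =====
def Spec_cubog1 (n : Int) (out : Int) : Prop := out = cubog1_alt n
instance (n : Int) (out : Int) : Decidable (Spec_cubog1 n out) := by unfold Spec_cubog1; infer_instance

-- ===== CLAIM (what is proved, stated in full; the proofs are below) =====
def Claim_equal_cubog1 : Prop := ∀ (n : Int), Dom_cubog1 n → Spec_cubog1 n (cubog1 n)

-- ===== LEMMAS AND PROOFS =====

-- Closed form for the inner loop: from x2 (with 1 ≤ x1 < n, x2 ≤ n) it adds, for each
-- remaining x2, 1 unless x2 = n - x1 or x2 = x1 (counting the overlap back once).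
theorem cubog1Inner_eq (n x1 : Int) (h1 : 1 ≤ x1) (h2 : x1 < n) :
    ∀ (k : Nat) (x2 s : Int), (n - x2).toNat = k → 1 ≤ x2 → x2 ≤ n →
      cubog1Inner n x1 x2 s =
        s + (n - x2) - (if x2 ≤ n - x1 then 1 else 0) - (if x2 ≤ x1 then 1 else 0)
          + (if x2 ≤ x1 ∧ 2 * x1 = n then 1 else 0) := by
  intro k
  induction k with
  | zero =>
    intro x2 s hk _ _
    have hx2 : x2 = n := by omega
    rw [cubog1Inner]
    simp only [hx2]
    split_ifs <;> omega
  | succ k ih =>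
    intro x2 s hk hx2 hx2n
    have hlt : x2 < n := by omega
    rw [cubog1Inner, if_pos hlt]
    rw [ih (x2 + 1) _ (by omega) (by omega) (by omega)]
    split_ifs <;> omega

-- Closed form for the outer loop: each x1 contributes (n-3) plus 1 if 2*x1 = n.
theorem cubog1Outer_eq (n : Int) (hn : 2 ≤ n) :
    ∀ (k : Nat) (x1 s : Int), (n - x1).toNat = k → 1 ≤ x1 → x1 ≤ n →
      cubog1Outer n x1 s =
        s + (n - x1) * (n - 3) + (if n % 2 = 0 ∧ 2 * x1 ≤ n then 1 else 0) := by
  intro k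
  induction k with
  | zero =>
    intro x1 s hk _ _
    have hx1 : x1 = n := by omega
    rw [cubog1Outer]
    simp only [hx1]
    have hz : (n - n) * (n - 3) = 0 := by ring
    split_ifs <;> omega
  | succ k ih =>
    intro x1 s hk hx1 hx1n
    have hlt : x1 < n := by omega
    rw [cubog1Outer, if_pos hlt]
    rw [cubog1Inner_eq n x1 hx1 hlt (n - 1).toNat 1 s (by omega) (by omega) (by omega)]
    rw [ih (x1 + 1) _ (by omega) (by omega) (by omega)]
    have hm : (n - x1) * (n - 3) = (n - (x1 + 1)) * (n - 3) + (n - 3) := by ring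
    split_ifs <;> omega

-- ===== VERDICT (by name: the statement is the Claim_ definition above) =====
theorem cubog1_spec : Claim_equal_cubog1 := by
  intro n _
  unfold Spec_cubog1 cubog1 cubog1_alt
  by_cases hn : n ≤ 1
  · rw [cubog1Outer, if_neg (by omega), if_pos hn]
  · rw [cubog1Outer_eq n (by omega) (n - 1).toNat 1 0 (by omega) (by omega) (by omega),
      if_neg hn]
    split_ifs <;> omega
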